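-- pv_equiv track=rewrite | github.com/gregdan3/kulupu-ilo | tputils/staircase.py | repr_staircase
-- ===== SOURCE A (Python) =====
-- from typing import Dict, List, Optional
--
-- def rm_str_prefix(str, prefix):
--     return str[len(prefix) :]
--
-- def repr_staircase(
--     stairs: str,
--     steps: Dict[str, List[str]],
--     past: Optional[List[str]] = None,
--     paths: Optional[List[List[str]]] = None,
-- ) -> Optional[List[List[str]]]:
--     """Given a 'staircase' string, return all possible paths through that
--     string given a list of possible steps. Returns None if not possible.
--     The complexity here is **bad**. This is depth first."""
--     if past is None:
--         past = []
--     if paths is None: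
--         paths = []
--     if not steps:
--         return
--     if not stairs:
--         if past:
--             paths.append(past)
--         return
--
--     for step in steps:
--         if stairs.startswith(step):
--             for substep in steps[step]:
--                 repr_staircase(
--                     rm_str_prefix(stairs, step), steps, past + [substep], paths
--                 )
--     return paths
-- ===== SOURCE B (Python) =====
-- from typing import Dict, List, Optional
--
-- def repr_staircase(
--     stairs: str,
--     steps: Dict[str, List[str]],
--     past: Optional[List[str]] = None,
--     paths: Optional[List[List[str]]] = None,
-- ) -> Optional[List[List[str]]]:
--     """Bottom-up dynamic programming over suffix positions: P[i] holds every
--     path through stairs[i:] as a shared cons-cell chain (substep, tail), so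
--     each suffix is computed once and extending a path is O(1); the chains are
--     materialized into lists only at the very end."""
--     if past is None:
--         past = []
--     if paths is None:
--         paths = []
--     if not steps:
--         return None
--     if not stairs:
--         if past:
--             paths.append(past)
--         return None
--     n = len(stairs)
--     P = [None] * (n + 1)
--     P[n] = [None]  # the empty chain: one way through the empty suffix
--     for i in range(n - 1, -1, -1):
--         P[i] = [
--             (substep, tail)
--             for step in steps
--             if stairs.startswith(step, i)
--             for substep in steps[step]
--             for tail in P[i + len(step)]
--         ]
--     for chain in P[0]:
--         path = []
--         while chain is not None:
--             path.append(chain[0])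
--             chain = chain[1]
--         paths.append(past + path)
--     return paths
-- ===== Notes on version B (the rewrite author's own statement) =====
-- stated objective: alternative
-- what changed: Replaces the naive depth-first recursion (which re-explores every suffix once per incoming path and rebuilds 'past' at each node) with a bottom-up dynamic program over suffix positions: a table P[i] of all paths through stairs[i:] stored as shared cons-cell chains, computed once per position and materialized into lists only at the end.
import Mathlib
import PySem

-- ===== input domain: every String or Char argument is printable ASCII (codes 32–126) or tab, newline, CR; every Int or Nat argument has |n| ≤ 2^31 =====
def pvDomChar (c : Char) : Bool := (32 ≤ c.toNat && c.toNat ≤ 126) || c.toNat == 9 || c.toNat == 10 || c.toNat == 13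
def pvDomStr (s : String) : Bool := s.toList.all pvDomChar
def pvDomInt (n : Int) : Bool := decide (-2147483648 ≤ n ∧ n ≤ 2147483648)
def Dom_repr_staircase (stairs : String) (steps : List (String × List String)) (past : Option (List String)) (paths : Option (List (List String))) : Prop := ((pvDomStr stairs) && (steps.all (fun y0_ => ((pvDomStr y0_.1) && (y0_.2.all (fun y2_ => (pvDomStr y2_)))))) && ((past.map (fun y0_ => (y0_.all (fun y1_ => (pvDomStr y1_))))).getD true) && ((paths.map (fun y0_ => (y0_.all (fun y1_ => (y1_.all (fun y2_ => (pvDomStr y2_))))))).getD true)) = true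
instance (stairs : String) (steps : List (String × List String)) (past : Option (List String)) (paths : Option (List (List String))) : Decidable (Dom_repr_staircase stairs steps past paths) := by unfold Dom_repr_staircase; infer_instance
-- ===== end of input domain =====

-- B replaces A's naive depth-first recursion by a bottom-up DP over suffix positions (alternative
-- algorithm, not claimed faster); equivalence is about the RETURN value only — A (and B) also
-- append the completed paths to a caller-supplied `paths` list, a side effect not modeled here.

-- ===== PORT A =====
-- the recursive DFS; `fuel` makes it total (stairs.length + 1 suffices under Pre_, where every
-- recursive call strips a non-empty matched step); the dict parameter arrives as an association
-- list and is loaded into a PySem.Dict exactly as Python builds a dict (later bindings overwrite).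
-- rm_str_prefix str prefix = str[len(prefix):] is List.drop (exact: the start bound is ≥ 0).
def pvGoA (d : PySem.Dict String (List String)) (fuel : Nat) (stairs : List Char)
    (past : List String) (paths : List (List String)) : List (List String) :=
  match fuel with
  | 0 => paths
  | fuel + 1 =>
    if d.keys.isEmpty then paths
    else if stairs.isEmpty then
      (if !past.isEmpty then paths ++ [past] else paths)
    else
      d.keys.foldl (fun acc step =>
        if PySem.Chars.startswith stairs step.toList then
          (d.getD step []).foldl (fun acc2 substep =>
            pvGoA d fuel (stairs.drop step.toList.length) (past ++ [substep]) acc2) acc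
        else acc) paths

def repr_staircase (stairs : String) (steps : List (String × List String)) (past : Option (List String)) (paths : Option (List (List String))) : Option (List (List String)) :=
  let past0 := past.getD []
  let paths0 := paths.getD []
  let d := steps.foldl (fun d kv => d.insert kv.1 kv.2) PySem.Dict.empty
  if d.keys.isEmpty then none
  else if stairs.toList.isEmpty then none
  else some (pvGoA d (stairs.toList.length + 1) stairs.toList past0 paths0)

-- ===== PORT B =====
-- bottom-up DP: pvTblB keys d s = [P[0], P[1], …, P[n]] where P[i] lists the paths through the
-- suffix s.drop i; a Python cons-cell chain (substep, tail) IS Lean's substep :: tail, and the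
-- final materialization of a chain is the list itself.  stairs.startswith(step, i) is
-- startswith on the suffix (exact for 0 ≤ i ≤ len); P[i + len(step)] is tbl[len(step) - 1] of
-- the table for the one-shorter suffix.
def pvTblB (keys : List String) (d : PySem.Dict String (List String)) :
    List Char → List (List (List String))
  | [] => [[[]]]
  | c :: cs =>
    let tbl := pvTblB keys d cs
    (keys.foldl (fun acc step =>
      if PySem.Chars.startswith (c :: cs) step.toList then
        acc ++ (d.getD step []).flatMap (fun substep =>
          (tbl.getD (step.toList.length - 1) []).map (fun tail => substep :: tail))
      else acc) []) :: tbl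

def repr_staircase_alt (stairs : String) (steps : List (String × List String)) (past : Option (List String)) (paths : Option (List (List String))) : Option (List (List String)) :=
  let past0 := past.getD []
  let paths0 := paths.getD []
  let d := steps.foldl (fun d kv => d.insert kv.1 kv.2) PySem.Dict.empty
  if d.keys.isEmpty then none
  else if stairs.toList.isEmpty then none
  else some (paths0 ++ ((pvTblB d.keys d stairs.toList).headD []).map (fun tail => past0 ++ tail))

-- ===== PRECONDITION & SPEC =====
-- Pre_ excludes exactly the inputs on which A never returns (RecursionError): a non-empty stairs
-- with a non-empty steps dict that maps the empty-string step to a non-empty substep list — there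
-- the empty step matches forever without consuming anything (B diverges on them too).
def Pre_repr_staircase (stairs : String) (steps : List (String × List String)) (past : Option (List String)) (paths : Option (List (List String))) : Prop :=
  steps = [] ∨ stairs = "" ∨
    (((steps.reverse.find? (fun kv => kv.1 == "")).map Prod.snd).getD []) = []
instance (stairs : String) (steps : List (String × List String)) (past : Option (List String)) (paths : Option (List (List String))) : Decidable (Pre_repr_staircase stairs steps past paths) := by unfold Pre_repr_staircase; infer_instance

def pvWitness_repr_staircase : String × (List (String × List String)) × Option (List String) × Option (List (List String)) :=
  ("ab", [("a", ["A1", "A2"]), ("b", ["B1"])], none, none)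

def Spec_repr_staircase (stairs : String) (steps : List (String × List String)) (past : Option (List String)) (paths : Option (List (List String))) (out : Option (List (List String))) : Prop := out = repr_staircase_alt stairs steps past paths
instance (stairs : String) (steps : List (String × List String)) (past : Option (List String)) (paths : Option (List (List String))) (out : Option (List (List String))) : Decidable (Spec_repr_staircase stairs steps past paths out) := by unfold Spec_repr_staircase; infer_instance

-- ===== CLAIM (what is proved, stated in full; the proofs are below) =====
def Claim_equal_repr_staircase : Prop := ∀ (stairs : String) (steps : List (String × List String)) (past : Option (List String)) (paths : Option (List (List String))), Dom_repr_staircase stairs steps past paths → Pre_repr_staircase stairs steps past paths → Spec_repr_staircase stairs steps past paths (repr_staircase stairs steps past paths)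

-- ===== LEMMAS AND PROOFS =====

-- getD of a dict loaded from an association list is the LAST binding of the key (Python dict).
theorem pvGetD_foldl_insert (l : List (String × List String)) (d : PySem.Dict String (List String)) (k : String) :
    (l.foldl (fun d kv => d.insert kv.1 kv.2) d).getD k [] =
      (((l.reverse.find? (fun kv => kv.1 == k)).map Prod.snd).getD (d.getD k [])) := by
  induction l generalizing d with
  | nil => simp
  | cons kv rest ih =>
    simp only [List.foldl_cons, List.reverse_cons, List.find?_append, ih]
    rcases h : rest.reverse.find? (fun kv => kv.1 == k) with _ | p
    · by_cases hk : kv.1 = k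
      · subst hk
        simp [h, List.find?, PySem.Dict.getD_insert_self]
      · have hb : (kv.1 == k) = false := by simpa using hk
        simp only [h, List.find?, hb, Option.none_or, Option.map_none, Option.getD_none]
        exact PySem.Dict.getD_insert_of_ne d kv.2 [] (Ne.symm hk)
    · simp [h]

-- a fold that conditionally appends a block distributes over its accumulator
theorem pvFoldl_if_append {α β : Type} (p : α → Bool) (g : α → List β) (l : List α) (acc : List β) :
    l.foldl (fun acc x => if p x = true then acc ++ g x else acc) acc =
      acc ++ l.foldl (fun acc x => if p x = true then acc ++ g x else acc) [] := by
  induction l generalizing acc with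
  | nil => simp
  | cons x l ih =>
    simp only [List.foldl_cons]
    rw [ih, ih (if p x = true then [] ++ g x else [])]
    by_cases hp : p x = true <;> simp [hp]

-- table entries: entry j of the table for s is the head row of the table for s.drop j
theorem pvTblB_getD (keys : List String) (d : PySem.Dict String (List String))
    (s : List Char) (j : Nat) (hj : j ≤ s.length) :
    (pvTblB keys d s).getD j [] = (pvTblB keys d (s.drop j)).headD [] := by
  induction s generalizing j with
  | nil =>
    have : j = 0 := by simpa using hj
    subst this
    simp [pvTblB]
  | cons c cs ih =>
    cases j with
    | zero => simp [pvTblB]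
    | succ j =>
      simp only [pvTblB, List.getD_cons_succ, List.drop_succ_cons]
      exact ih j (by simpa using hj)

-- the main invariant: the DFS started at suffix s with accumulator `paths` appends exactly the
-- head row of B's table for s, each path prefixed by `past`.
theorem pvGoA_eq_row (d : PySem.Dict String (List String))
    (hK : d.keys ≠ []) (hE : d.getD "" [] = [])
    (fuel : Nat) (s : List Char) (past : List String) (paths : List (List String))
    (hfuel : s.length + 1 ≤ fuel) (hpast : s = [] → past ≠ []) :
    pvGoA d fuel s past paths =
      paths ++ ((pvTblB d.keys d s).headD []).map (fun tail => past ++ tail) := by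
  induction fuel generalizing s past paths with
  | zero => omega
  | succ fuel ih =>
    cases s with
    | nil =>
      have hp := hpast rfl
      simp [pvGoA, pvTblB, hK, hp, List.isEmpty_iff]
    | cons c cs =>
      rw [pvGoA]
      simp only [List.isEmpty_iff, List.isEmpty_cons, hK, if_false, Bool.false_eq_true,
        if_false, pvTblB, List.headD_cons]
      -- generalize over the key list being folded
      suffices h : ∀ (ks : List String) (P : List (List String)),
          ks.foldl (fun acc step =>
            if PySem.Chars.startswith (c :: cs) step.toList then
              (d.getD step []).foldl (fun acc2 substep =>
                pvGoA d fuel ((c :: cs).drop step.toList.length) (past ++ [substep]) acc2) acc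
            else acc) P =
          P ++ (ks.foldl (fun acc step =>
            if PySem.Chars.startswith (c :: cs) step.toList then
              acc ++ (d.getD step []).flatMap (fun substep =>
                ((pvTblB d.keys d cs).getD (step.toList.length - 1) []).map
                  (fun tail => substep :: tail))
            else acc) []).map (fun tail => past ++ tail) by
        exact h d.keys paths
      intro ks
      induction ks with
      | nil => simp
      | cons step ks ihk =>
        intro P
        simp only [List.foldl_cons]
        rw [ihk]
        conv_rhs => rw [pvFoldl_if_append]
        rw [List.map_append, ← List.append_assoc]
        congr 1
        -- goal: one matched step's contribution
        by_cases hsw : PySem.Chars.startswith (c :: cs) step.toList = true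
        · simp only [hsw, if_true, List.nil_append]
          cases hstep : step.toList with
          | nil =>
            -- the empty step: its substep list is empty by hE
            have hse : step = "" := by
              have := congrArg String.ofList hstep; simpa using this
            subst hse
            simp [hE]
          | cons a as =>
            -- non-empty step: it strips ≥ 1 char, recursion goes through ih
            have hlen : step.toList.length ≤ (c :: cs).length := by
              have hpre := (PySem.Chars.startswith_iff (s := c :: cs) (p := step.toList)).mp hsw
              simpa using hpre.length_le
            have hrow : ((pvTblB d.keys d cs).getD (step.toList.length - 1) []) =
                (pvTblB d.keys d ((c :: cs).drop step.toList.length)).headD [] := by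
              rw [pvTblB_getD d.keys d cs (step.toList.length - 1)
                (by simp only [hstep, List.length_cons] at hlen ⊢; omega)]
              congr 1
              rw [hstep]
              simp
            rw [hstep] at hrow hlen
            rw [hrow]
            generalize (d.getD step []) = subs
            induction subs generalizing P with
            | nil => simp
            | cons sub subs ihs =>
              simp only [List.foldl_cons, List.flatMap_cons, List.map_append, List.map_map]
              rw [ihs]
              rw [ih ((c :: cs).drop (a :: as).length) (past ++ [sub]) P
                (by simp only [List.length_cons, List.length_drop] at hlen hfuel ⊢; omega)
                (by simp)]
              simp [Function.comp_def, List.append_assoc]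
        · simp only [Bool.not_eq_true] at hsw
          simp [hsw]

-- ===== VERDICT (by name: the statement is the Claim_ definition above) =====
theorem repr_staircase_spec : Claim_equal_repr_staircase := by
  intro stairs steps past paths _ hpre
  unfold Spec_repr_staircase repr_staircase repr_staircase_alt
  by_cases hk : (steps.foldl (fun d kv => d.insert kv.1 kv.2) PySem.Dict.empty).keys.isEmpty = true
  · simp [hk]
  · simp only [hk, Bool.false_eq_true, if_false]
    by_cases hs : stairs.toList.isEmpty = true
    · simp [hs]
    · simp only [hs, Bool.false_eq_true, if_false]
      have hK : (steps.foldl (fun d kv => d.insert kv.1 kv.2) PySem.Dict.empty).keys ≠ [] := by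
        simpa [List.isEmpty_iff] using hk
      have hsteps : steps ≠ [] := by
        intro h; subst h; simp [PySem.Dict.keys_empty] at hK
      have hstairs : stairs ≠ "" := by
        intro h; subst h; simp at hs
      have hE : (steps.foldl (fun d kv => d.insert kv.1 kv.2) PySem.Dict.empty).getD "" [] = [] := by
        rcases hpre with h | h | h
        · exact absurd h hsteps
        · exact absurd h hstairs
        · rw [pvGetD_foldl_insert]
          simpa [PySem.Dict.getD_empty] using h
      rw [pvGoA_eq_row _ hK hE _ _ _ _ (Nat.le_refl _)
        (by intro h; exact absurd (by simpa [List.isEmpty_iff] using h) (by simpa [List.isEmpty_iff] using hs))]
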